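/- GENERATED by c/gen_decode.py: decode facts of the image, one per distinct instruction byte string. -/
import UserX.DecodeImage

#decode_all Vorbis.Dec
  "01dd"  -- add ebp,ebx
  "0f834affffff"  -- jae 1093c4
  "0f84cc000000"  -- je 10f645
  "0f8689000000"  -- jbe 1024f7
  "0f8e93010000"  -- jle 1133d6
  "0fb64c2418"  -- movzx ecx,BYTE PTR [rsp+0x18]
  "29f2"  -- sub edx,esi
  "4101c4"  -- add r12d,eax
  "4138d7"  -- cmp r15b,dl
  "4183ef01"  -- sub r15d,0x1
  "4189f4"  -- mov r12d,esi
  "41be01000000"  -- mov r14d,0x1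
  "4283bcb48002000000"  -- cmp DWORD PTR [rsp+r14*4+0x280],0x0
  "44396304"  -- cmp DWORD PTR [rbx+0x4],r12d
  "44894c247c"  -- mov DWORD PTR [rsp+0x7c],r9d
  "4489bde4060000"  -- mov DWORD PTR [rbp+0x6e4],r15d
  "448b7590"  -- mov r14d,DWORD PTR [rbp-0x70]
  "450fb6c7"  -- movzx r8d,r15b
  "4589e5"  -- mov r13d,r12d
  "46887c3341"  -- mov BYTE PTR [rbx+r14*1+0x41],r15b
  "4863442408"  -- movsxd rax,DWORD PTR [rsp+0x8]
  "4881c4880b0000"  -- add rsp,0xb88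
  "4883ee08"  -- sub rsi,0x8
  "4889b530ffffff"  -- mov QWORD PTR [rbp-0xd0],rsi
  "488b542408"  -- mov rdx,QWORD PTR [rsp+0x8]
  "488bb578ffffff"  -- mov rsi,QWORD PTR [rbp-0x88]
  "488d73b0"  -- lea rsi,[rbx-0x50]
  "488d7d70"  -- lea rdi,[rbp+0x70]
  "488dbbb0050000"  -- lea rdi,[rbx+0x5b0]
  "488dbdd8060000"  -- lea rdi,[rbp+0x6d8]
  "48c744246080391100"  -- mov QWORD PTR [rsp+0x60],0x113980
  "4929f4"  -- sub r12,rsi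
  "4989d1"  -- mov r9,rdx
  "498d7c2418"  -- lea rdi,[r12+0x18]
  "498dbde8060000"  -- lea rdi,[r13+0x6e8]
  "4a8d7c3301"  -- lea rdi,[rbx+r14*1+0x1]
  "4c03a338080000"  -- add r12,QWORD PTR [rbx+0x838]
  "4c89ad50ffffff"  -- mov QWORD PTR [rbp-0xb0],r13
  "4c8b7c2408"  -- mov r15,QWORD PTR [rsp+0x8]
  "4c8dacdd68030000"  -- lea r13,[rbp+rbx*8+0x368]
  "4d89f9"  -- mov r9,r15
  "5d"  -- pop rbp
  "66410f6ecf"  -- movd xmm1,r15d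
  "66480f6ecd"  -- movq xmm1,rbp
  "7414"  -- je 10b3b4
  "74e4"  -- je 1082c2
  "76d4"  -- jbe 104549
  "7dd5"  -- jge 108283
  "7f9c"  -- jg 11571b
  "837c241000"  -- cmp DWORD PTR [rsp+0x10],0x0
  "84d2"  -- test dl,dl
  "896b54"  -- mov DWORD PTR [rbx+0x54],ebp
  "89da"  -- mov edx,ebx
  "8b53a0"  -- mov edx,DWORD PTR [rbx-0x60]
  "8b85d0050000"  -- mov eax,DWORD PTR [rbp+0x5d0]
  "b800000000"  -- mov eax,0x0
  "c1e504"  -- shl ebp,0x4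
  "c7803c00c000f2f2f2f2"  -- mov DWORD PTR [rax+0xc0003c],0xf2f2f2f2
  "d1ff"  -- sar edi,1
  "e80893ffff"  -- call 101520
  "e8127effff"  -- call 100800
  "e81c1bffff"  -- call 100800
  "e825f6feff"  -- call 100640
  "e82ef0feff"  -- call 100640
  "e8390fffff"  -- call 100300
  "e844a8feff"  -- call 100480
  "e84e29ffff"  -- call 100640
  "e859e7feff"  -- call 103d00
  "e86831ffff"  -- call 100640
  "e872f7ffff"  -- call 100200
  "e87d71ffff"  -- call 100720
  "e88912ffff"  -- call 100300
  "e892ebfeff"  -- call 100640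
  "e89cbafeff"  -- call 1008e0
  "e8a769ffff"  -- call 100640
  "e8b158ffff"  -- call 103d00
  "e8bafaffff"  -- call 10cf40
  "e8c568ffff"  -- call 100640
  "e8ce90ffff"  -- call 100800
  "e8d99fffff"  -- call 10d1c0
  "e8e2faffff"  -- call 101d00
  "e8ec1dffff"  -- call 100640
  "e8f5acffff"  -- call 100640
  "e902feffff"  -- jmp 1146d2
  "e945ffffff"  -- jmp 10798e
  "e996feffff"  -- jmp 110d0a
  "e9ea010000"  -- jmp 10f692
  "eb5e"  -- jmp 104579
  "ebd9"  -- jmp 108e7f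
  "f20f580597d70100"  -- addsd xmm0,QWORD PTR [rip+0x1d797]
  "f20f5e0d74e10100"  -- divsd xmm1,QWORD PTR [rip+0x1e174]
  "f30f104c2440"  -- movss xmm1,DWORD PTR [rsp+0x40]
  "f30f1073cc"  -- movss xmm6,DWORD PTR [rbx-0x34]
  "f30f114de8"  -- movss DWORD PTR [rbp-0x18],xmm1
  "f30f11742408"  -- movss DWORD PTR [rsp+0x8],xmm6
  "f30f58c6"  -- addss xmm0,xmm6
  "f30f59d0"  -- mulss xmm2,xmm0
  "f3410f100424"  -- movss xmm0,DWORD PTR [r12]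
  "f3410f5806"  -- addss xmm0,DWORD PTR [r14]
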